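-- pv_equiv track=rewrite | github.com/RiadMoudjahed/SOC-Analyst-Projects | SIEM/Backdoor Activity Analyzer/backdoor_analyzer.py | detect_repeated_ips
-- ===== SOURCE A (Python) =====
-- from collections import defaultdict
--
-- def detect_repeated_ips(window_dict):
--     ip_frequency = defaultdict(int)
--     ip_window = defaultdict(list)
--     for window, ip_set in window_dict.items():
--         for ip in ip_set:
--             ip_frequency[ip] += 1
--             ip_window[ip].append(window)
--     return ip_frequency, ip_window
-- ===== SOURCE B (Python) =====
-- from collections import defaultdict
--
-- def detect_repeated_ips(window_dict):
--     # Flatten to a list of (ip, window) events, then group: for each distinct IP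
--     # (first-occurrence order) scan the event list for its count and its windows.
--     pairs = [(ip, window) for window, ip_set in window_dict.items() for ip in ip_set]
--     order = list(dict.fromkeys(ip for ip, _ in pairs))
--     ip_frequency = defaultdict(int, {ip: sum(1 for i, _ in pairs if i == ip) for ip in order})
--     ip_window = defaultdict(list, {ip: [w for i, w in pairs if i == ip] for ip in order})
--     return ip_frequency, ip_window
-- ===== Notes on version B (the rewrite author's own statement) =====
-- stated objective: alternative
-- what changed: Instead of one nested loop incrementally updating two defaultdicts, B flattens the input into an (ip, window) event list, dedups the ips for first-occurrence order, and builds both dicts by per-IP scans of the event list (count and filtered windows).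
import Mathlib
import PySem

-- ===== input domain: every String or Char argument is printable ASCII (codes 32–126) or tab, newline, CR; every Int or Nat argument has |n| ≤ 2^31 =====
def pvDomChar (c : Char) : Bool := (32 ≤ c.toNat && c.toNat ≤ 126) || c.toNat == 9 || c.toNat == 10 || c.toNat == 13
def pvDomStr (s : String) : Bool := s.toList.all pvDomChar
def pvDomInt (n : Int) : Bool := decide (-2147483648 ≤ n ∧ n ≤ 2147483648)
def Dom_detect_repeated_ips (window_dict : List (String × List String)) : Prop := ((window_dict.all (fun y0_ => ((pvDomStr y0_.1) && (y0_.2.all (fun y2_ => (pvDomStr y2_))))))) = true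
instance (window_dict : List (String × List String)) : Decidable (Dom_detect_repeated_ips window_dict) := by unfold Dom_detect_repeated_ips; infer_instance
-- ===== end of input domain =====

-- B flattens the input into an (ip, window) event list and builds both dicts by
-- per-IP scans of that list (objective: alternative decomposition, not faster).

-- ===== PORT A =====
-- one nested loop maintaining BOTH defaultdicts: ip_frequency[ip] += 1; ip_window[ip].append(window)
def detect_repeated_ips (window_dict : List (String × List String)) : (List (String × Int)) × (List (String × List String)) :=
  let st := window_dict.foldl
    (fun (st : PySem.Dict String Int × PySem.Dict String (List String)) wp =>
      wp.2.foldl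
        (fun (st : PySem.Dict String Int × PySem.Dict String (List String)) ip =>
          (st.1.modify ip 0 (fun v => v + 1), st.2.modify ip [] (fun ws => ws ++ [wp.1])))
        st)
    (PySem.Dict.empty, PySem.Dict.empty)
  (st.1.items, st.2.items)

-- ===== PORT B =====
-- flatten to (ip, window) events; dedup ips (dict.fromkeys); per-IP scans build each dict
def detect_repeated_ips_alt (window_dict : List (String × List String)) : (List (String × Int)) × (List (String × List String)) :=
  let pairs := window_dict.flatMap (fun wp => wp.2.map (fun ip => (ip, wp.1)))
  let order := PySem.List.dedup (pairs.map Prod.fst)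
  (order.map (fun ip => (ip, ((pairs.countP (fun p => p.1 == ip) : Nat) : Int))),
   order.map (fun ip => (ip, (pairs.filter (fun p => p.1 == ip)).map Prod.snd)))

-- ===== PRECONDITION & SPEC =====
def Spec_detect_repeated_ips (window_dict : List (String × List String)) (out : (List (String × Int)) × (List (String × List String))) : Prop := out = detect_repeated_ips_alt window_dict
instance (window_dict : List (String × List String)) (out : (List (String × Int)) × (List (String × List String))) : Decidable (Spec_detect_repeated_ips window_dict out) := by unfold Spec_detect_repeated_ips; infer_instance

-- ===== CLAIM (what is proved, stated in full; the proofs are below) =====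
def Claim_equal_detect_repeated_ips : Prop := ∀ (window_dict : List (String × List String)), Dom_detect_repeated_ips window_dict → Spec_detect_repeated_ips window_dict (detect_repeated_ips window_dict)

-- ===== LEMMAS AND PROOFS =====

-- a fold whose step acts componentwise on a pair splits into two folds
theorem pvProd_foldl {α β σ : Type} (g : α → σ → α) (h : β → σ → β)
    (l : List σ) (a : α) (b : β) :
    l.foldl (fun st x => (g st.1 x, h st.2 x)) (a, b) = (l.foldl g a, l.foldl h b) := by
  induction l generalizing a b with
  | nil => rfl
  | cons x rest ih => exact ih _ _

-- A's pair-state nested fold splits into the frequency fold and the window fold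
theorem pvA_split (l : List (String × List String))
    (f : PySem.Dict String Int) (w : PySem.Dict String (List String)) :
    l.foldl
      (fun (st : PySem.Dict String Int × PySem.Dict String (List String)) wp =>
        wp.2.foldl
          (fun (st : PySem.Dict String Int × PySem.Dict String (List String)) ip =>
            (st.1.modify ip 0 (fun v => v + 1), st.2.modify ip [] (fun ws => ws ++ [wp.1])))
          st)
      (f, w)
    = (l.foldl (fun d wp => wp.2.foldl (fun d ip => d.modify ip 0 (fun v => v + 1)) d) f,
       l.foldl (fun d wp => wp.2.foldl (fun d ip => d.modify ip [] (fun ws => ws ++ [wp.1])) d) w) := by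
  induction l generalizing f w with
  | nil => rfl
  | cons wp rest ih =>
    simp only [List.foldl_cons]
    rw [pvProd_foldl (fun d ip => d.modify ip 0 (fun v => v + 1))
          (fun d ip => d.modify ip [] (fun ws => ws ++ [wp.1])) wp.2 f w]
    exact ih _ _

-- abbreviation for B's flattened event list
def pvPairs (l : List (String × List String)) : List (String × String) :=
  l.flatMap (fun wp => wp.2.map (fun ip => (ip, wp.1)))

theorem pvPairs_map_fst (l : List (String × List String)) :
    (pvPairs l).map Prod.fst = l.flatMap (fun wp => wp.2) := by
  simp [pvPairs, List.map_flatMap, List.map_map, Function.comp_def]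

-- A's frequency fold is Counter of the flattened ip list
theorem pvFreq_eq_counter (l : List (String × List String)) :
    l.foldl (fun d wp => wp.2.foldl (fun d ip => d.modify ip 0 (fun v => v + 1)) d) PySem.Dict.empty
      = PySem.Dict.counter (l.flatMap (fun wp => wp.2)) := by
  rw [PySem.Dict.counter_eq_foldl, List.foldl_flatMap]

-- A's window fold is the fold of the append step over the flattened event list
theorem pvWin_eq_pairs_fold (l : List (String × List String)) :
    l.foldl (fun d wp => wp.2.foldl (fun d ip => d.modify ip [] (fun ws => ws ++ [wp.1])) d) PySem.Dict.empty
      = (pvPairs l).foldl (fun d p => d.modify p.1 [] (fun ws => ws ++ [p.2])) PySem.Dict.empty := by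
  rw [pvPairs, List.foldl_flatMap]
  congr 1
  funext d wp
  rw [List.foldl_map]

-- ===== VERDICT (by name: the statement is the Claim_ definition above) =====
theorem detect_repeated_ips_spec : Claim_equal_detect_repeated_ips := by
  intro wd _
  unfold Spec_detect_repeated_ips detect_repeated_ips detect_repeated_ips_alt
  simp only [pvA_split, PySem.List.dedup_eq_ofList]
  rw [Prod.mk.injEq]
  constructor
  · -- frequency component
    rw [pvFreq_eq_counter, PySem.Dict.items_counter,
        show wd.flatMap (fun wp => wp.2) = (pvPairs wd).map Prod.fst from (pvPairs_map_fst wd).symm]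
    refine List.map_congr_left (fun k _ => ?_)
    congr 1
    rw [List.count_eq_countP, List.countP_map, pvPairs]
    simp [Function.comp_def]
  · -- window component
    rw [pvWin_eq_pairs_fold]
    set w := (pvPairs wd).foldl (fun d p => d.modify p.1 [] (fun ws => ws ++ [p.2])) PySem.Dict.empty with hw
    have hkeys : w.keys = PySem.Set.ofList ((pvPairs wd).map Prod.fst) := by
      rw [hw, PySem.Dict.keys_foldl_modify_key, PySem.Dict.keys_empty, PySem.Set.update_nil_left]
    have hnd : w.keys.Nodup := by
      rw [hkeys]; exact PySem.Set.nodup_ofList _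
    rw [PySem.Dict.items_eq_map_keys w hnd [], hkeys]
    refine List.map_congr_left (fun k _ => ?_)
    congr 1
    rw [hw, PySem.Dict.getD_foldl_modify_append, PySem.Dict.getD_empty]
    simp [pvPairs]
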